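-- pv_equiv track=rewrite | github.com/jerry81/leetcode | 19MaxErasureValue/max_erasure.py | maximumUniqueSubarrayBRUTE
-- ===== SOURCE A (Python) =====
-- from typing import List
--
-- def maximumUniqueSubarrayBRUTE(nums: List[int]) -> int:
--     # brute force - find all unique subarrays
--     max = 0
--     for head in range(len(nums)):
--         for tail in range(head+1, len(nums)+1):
--             sub = nums[head:tail]
--             if len(list(set(sub))) == len(sub): # uniqueness check
--                 csum = sum(sub)
--                 if csum > max:
--                     max = csum
--     return max
-- ===== SOURCE B (Python) =====
-- def maximumUniqueSubarrayBRUTE(nums):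
--     # For each head, extend the window element by element, keeping an
--     # incremental seen-set and running sum; stop at the first duplicate
--     # (any longer window from this head is non-unique too).
--     best = 0
--     for head in range(len(nums)):
--         seen = set()
--         csum = 0
--         for x in nums[head:]:
--             if x in seen:
--                 break
--             seen.add(x)
--             csum += x
--             if csum > best:
--                 best = csum
--     return best
-- ===== Notes on version B (the rewrite author's own statement) =====
-- stated objective: faster
-- what changed: Instead of materialising every slice and re-building a set per slice, B extends each window incrementally with a running sum and a seen-set, breaking at the first duplicate, which removes the per-slice rebuild and the tails past the first duplicate.
import Mathlib
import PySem

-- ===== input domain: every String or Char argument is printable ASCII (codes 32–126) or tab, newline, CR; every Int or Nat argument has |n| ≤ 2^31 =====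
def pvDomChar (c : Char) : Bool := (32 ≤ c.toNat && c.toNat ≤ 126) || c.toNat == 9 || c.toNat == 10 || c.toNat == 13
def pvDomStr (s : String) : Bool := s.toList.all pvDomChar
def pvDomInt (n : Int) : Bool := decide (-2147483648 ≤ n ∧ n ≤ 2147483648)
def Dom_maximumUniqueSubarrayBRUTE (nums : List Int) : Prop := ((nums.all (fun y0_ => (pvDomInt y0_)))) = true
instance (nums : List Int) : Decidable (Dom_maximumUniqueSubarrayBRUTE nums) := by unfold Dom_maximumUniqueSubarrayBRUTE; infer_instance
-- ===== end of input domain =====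

-- B replaces A's cubic rebuild-a-set-per-slice scan by an incremental window
-- (running sum + seen-set, break at the first duplicate): same value, fewer passes.

-- ===== PORT A =====
def maximumUniqueSubarrayBRUTE (nums : List Int) : Int :=
  (PySem.List.pyRange 0 (nums.length : Int) 1).foldl (fun m head =>
    (PySem.List.pyRange (head + 1) ((nums.length : Int) + 1) 1).foldl (fun m tail =>
      let sub := PySem.List.slice nums (some head) (some tail)
      if (PySem.Set.ofList sub).length = sub.length then
        let csum := sub.sum
        if csum > m then csum else m
      else m) m) 0

-- ===== PORT B =====
-- inner 'for x in nums[head:]' loop with break: structural recursion on the suffix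
def pvGo (seen : PySem.Set Int) (csum best : Int) : List Int → Int
  | [] => best
  | x :: rest =>
    if PySem.Set.contains seen x then best
    else
      let c := csum + x
      pvGo (PySem.Set.add seen x) c (if c > best then c else best) rest

def maximumUniqueSubarrayBRUTE_alt (nums : List Int) : Int :=
  (PySem.List.pyRange 0 (nums.length : Int) 1).foldl (fun best head =>
    pvGo PySem.Set.empty 0 best (PySem.List.slice nums (some head) none)) 0

-- ===== PRECONDITION & SPEC =====
def Spec_maximumUniqueSubarrayBRUTE (nums : List Int) (out : Int) : Prop := out = maximumUniqueSubarrayBRUTE_alt nums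
instance (nums : List Int) (out : Int) : Decidable (Spec_maximumUniqueSubarrayBRUTE nums out) := by unfold Spec_maximumUniqueSubarrayBRUTE; infer_instance

-- ===== CLAIM (what is proved, stated in full; the proofs are below) =====
def Claim_equal_maximumUniqueSubarrayBRUTE : Prop := ∀ (nums : List Int), Dom_maximumUniqueSubarrayBRUTE nums → Spec_maximumUniqueSubarrayBRUTE nums (maximumUniqueSubarrayBRUTE nums)

-- ===== LEMMAS AND PROOFS =====

-- common reference loop: best over the nodup prefixes of s, accumulated onto acc
def pvF (s : List Int) (acc : Int) : Int :=
  (List.range s.length).foldl (fun m k =>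
    if (s.take (k+1)).Nodup then
      (if (s.take (k+1)).sum > m then (s.take (k+1)).sum else m)
    else m) acc

lemma pv_uniq_test (l : List Int) :
    ((PySem.Set.ofList l).length = l.length) ↔ l.Nodup := by
  have hperm : (PySem.Set.ofList l).Perm l.dedup :=
    (List.perm_ext_iff_of_nodup (PySem.Set.nodup_ofList l) (List.nodup_dedup l)).2
      (by simp [PySem.Set.mem_ofList, List.mem_dedup])
  constructor
  · intro h
    have hl : l.dedup = l :=
      (List.dedup_sublist l).eq_of_length (by rw [← hperm.length_eq, h])
    rw [← hl]; exact List.nodup_dedup l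
  · intro h
    rw [PySem.Set.ofList_eq_self_of_nodup l h]

lemma pvA_inner (nums : List Int) (h : Nat) (m : Int) :
    (PySem.List.pyRange ((h : Int) + 1) ((nums.length : Int) + 1) 1).foldl (fun m tail =>
      let sub := PySem.List.slice nums (some (h : Int)) (some tail)
      if (PySem.Set.ofList sub).length = sub.length then
        let csum := sub.sum
        if csum > m then csum else m
      else m) m = pvF (nums.drop h) m := by
  rw [PySem.List.pyRange_one]
  have hlen : ((((nums.length : Int)) + 1) - ((h : Int) + 1)).toNat = (nums.drop h).length := by
    simp
  rw [hlen, List.foldl_map]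
  unfold pvF
  apply PySem.List.foldl_congr_mem
  intro acc k hk
  have hsl : PySem.List.slice nums (some (h : Int)) (some ((h : Int) + 1 + (k : Int)))
      = (nums.drop h).take (k + 1) := by
    have := PySem.List.slice_natCast_add nums h (k + 1)
    have hcast : ((h : Int) + 1 + (k : Int)) = ((h : Int) + ((k + 1 : Nat) : Int)) := by push_cast; ring
    rw [hcast, this]
  simp only [hsl, pv_uniq_test]

lemma pvGo_eq (l : List Int) (p : List Int) (acc : Int) (hp : p.Nodup) :
    pvGo (PySem.Set.ofList p) p.sum acc l =
    (List.range l.length).foldl (fun m k =>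
      if (p ++ l.take (k+1)).Nodup then
        (if (p ++ l.take (k+1)).sum > m then (p ++ l.take (k+1)).sum else m)
      else m) acc := by
  induction l generalizing p acc with
  | nil => simp [pvGo]
  | cons x rest ih =>
    by_cases hx : x ∈ p
    · have hc : PySem.Set.contains (PySem.Set.ofList p) x = true := by
        simp [PySem.Set.contains_eq_listContains, PySem.Set.mem_ofList, hx]
      rw [pvGo, hc, if_pos rfl]
      rw [PySem.List.foldl_congr_mem (g := fun m _ => m), PySem.List.foldl_ignore]
      intro acc' k hk
      have hnd : ¬ (p ++ (x :: rest).take (k + 1)).Nodup := by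
        rw [List.nodup_append]
        rintro ⟨-, -, hdisj⟩
        exact hdisj x hx x (by simp) rfl
      rw [if_neg hnd]
    · have hc : PySem.Set.contains (PySem.Set.ofList p) x = false := by
        simp [PySem.Set.contains_eq_listContains, PySem.Set.mem_ofList, hx]
      rw [pvGo, hc]
      simp only [Bool.false_eq_true, if_false]
      have hadd : PySem.Set.add (PySem.Set.ofList p) x = PySem.Set.ofList (p ++ [x]) := by
        rw [PySem.Set.ofList_append_singleton]
      have hnd1 : (p ++ [x]).Nodup := by
        rw [List.nodup_append]
        exact ⟨hp, List.nodup_singleton x, by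
          intro a ha b hb
          rw [List.mem_singleton] at hb
          subst hb
          exact fun he => hx (he ▸ ha)⟩
      have hsum : p.sum + x = (p ++ [x]).sum := by simp
      rw [hadd, hsum, ih (p ++ [x]) _ hnd1]
      rw [List.length_cons, List.range_succ_eq_map]
      simp only [List.foldl_cons, List.foldl_map]
      have h0 : (p ++ (x :: rest).take (0 + 1)).Nodup := by simpa using hnd1
      rw [if_pos h0]
      have : (p ++ (x :: rest).take (0 + 1)).sum = (p ++ [x]).sum := by simp
      rw [this]
      apply PySem.List.foldl_congr_mem
      intro acc' k hk
      have hts : (x :: rest).take (Nat.succ k + 1) = x :: rest.take (k + 1) := by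
        simp [List.take_succ_cons]
      simp [hts, List.append_assoc]

lemma pvB_inner (s : List Int) (acc : Int) :
    pvGo PySem.Set.empty 0 acc s = pvF s acc := by
  have := pvGo_eq s [] acc List.nodup_nil
  simpa [pvF, PySem.Set.empty] using this

-- ===== VERDICT (by name: the statement is the Claim_ definition above) =====
theorem maximumUniqueSubarrayBRUTE_spec : Claim_equal_maximumUniqueSubarrayBRUTE := by
  intro nums _
  unfold Spec_maximumUniqueSubarrayBRUTE maximumUniqueSubarrayBRUTE maximumUniqueSubarrayBRUTE_alt
  apply PySem.List.foldl_congr_mem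
  intro acc head hmem
  rw [PySem.List.mem_pyRange_one] at hmem
  obtain ⟨h0, hlt⟩ := hmem
  obtain ⟨k, rfl⟩ := Int.eq_ofNat_of_zero_le h0
  rw [PySem.List.slice_from_natCast, pvB_inner, pvA_inner]
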